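-- pv_equiv track=rewrite | github.com/AstroLis/test-maker | opt_form.py | DStrIMask
-- ===== SOURCE A (Python) =====
-- def DStrIMask(i,m):
--  lett=['A','B','C','D','E','F','G']
--  strf=''
--  n=3
--  f=i
--  first=1
--  for ii in range(0,3):
--   bit=f%2
--   f=f>>1
--   mbit=m%2
--   m=m>>1
--   if(not mbit):
--    if not first:
--     strf+=' \\cdot '
--    else:
--     first=0
--    if(bit):
--     strf+=lett[ii]
--    else:
--     strf+='\\overline{'+lett[ii]+'}'
--  return strf
-- ===== SOURCE B (Python) =====
-- def DStrIMask(i, m):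
--     def go(letters, k):
--         # recursion on the letter list; bits read by shift-and-mask, no mutated loop state
--         if not letters:
--             return []
--         rest = go(letters[1:], k + 1)
--         if (m >> k) & 1:
--             return rest
--         term = letters[0] if (i >> k) & 1 else '\\overline{' + letters[0] + '}'
--         return [term] + rest
--     return ' \\cdot '.join(go(['A', 'B', 'C'], 0))
-- ===== Notes on version B (the rewrite author's own statement) =====
-- stated objective: alternative
-- what changed: Replace A's imperative loop that mutates f/m in place and threads a first-flag through string concatenation by a recursion over the letter list that reads bit k directly with (n >> k) & 1, collects the kept terms, and joins them once at the end.
import Mathlib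
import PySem

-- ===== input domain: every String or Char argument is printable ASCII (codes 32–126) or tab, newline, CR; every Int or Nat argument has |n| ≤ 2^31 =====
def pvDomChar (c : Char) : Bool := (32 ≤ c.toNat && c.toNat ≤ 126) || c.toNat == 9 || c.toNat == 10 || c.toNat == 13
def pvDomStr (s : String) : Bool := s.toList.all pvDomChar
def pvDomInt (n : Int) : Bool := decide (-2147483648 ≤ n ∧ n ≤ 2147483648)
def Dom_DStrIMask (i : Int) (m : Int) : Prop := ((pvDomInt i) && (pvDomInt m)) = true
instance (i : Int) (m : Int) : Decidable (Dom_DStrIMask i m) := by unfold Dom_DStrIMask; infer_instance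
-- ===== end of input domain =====

-- B replaces A's mutating loop (first-flag, f/m shifted in place, string concatenation) by a
-- recursion over the letter list that reads bit k with (n >> k) & 1 and joins the kept terms once.

-- ===== PORT A =====
-- literal transliteration of A: fold over range(0,3) carrying (strf, f, m, first)
def DStrIMask (i : Int) (m : Int) : String :=
  let lett : List String := ["A","B","C","D","E","F","G"]
  let st := (PySem.List.pyRange 0 3 1).foldl (fun (st : String × Int × Int × Int) ii =>
    let strf := st.1
    let f := st.2.1
    let m := st.2.2.1
    let first := st.2.2.2
    let bit := PySem.Int.mod f 2
    let f := f >>> (1 : Nat)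
    let mbit := PySem.Int.mod m 2
    let m := m >>> (1 : Nat)
    if mbit == 0 then
      let strf := if first == 0 then strf ++ " \\cdot " else strf
      let first : Int := 0
      let strf := if bit ≠ 0 then strf ++ PySem.List.pyGetD lett ii ""
                  else strf ++ "\\overline{" ++ PySem.List.pyGetD lett ii "" ++ "}"
      (strf, f, m, first)
    else (strf, f, m, first)) ("", i, m, 1)
  st.1

-- ===== PORT B =====
-- B-side helper: transliteration of B's inner recursive 'go' (recursion on the letter list)
def pvGo (i m : Int) : List String → Nat → List String
  | [], _ => []
  | head :: tail, k =>
    let rest := pvGo i m tail (k + 1)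
    if PySem.Int.band (m >>> k) 1 ≠ 0 then rest
    else (if PySem.Int.band (i >>> k) 1 ≠ 0 then head
          else "\\overline{" ++ head ++ "}") :: rest

-- literal transliteration of B: join the collected terms
def DStrIMask_alt (i : Int) (m : Int) : String :=
  PySem.Str.join " \\cdot " (pvGo i m ["A", "B", "C"] 0)

-- ===== PRECONDITION & SPEC =====
def Spec_DStrIMask (i : Int) (m : Int) (out : String) : Prop := out = DStrIMask_alt i m
instance (i : Int) (m : Int) (out : String) : Decidable (Spec_DStrIMask i m out) := by unfold Spec_DStrIMask; infer_instance

-- ===== CLAIM =====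
def Claim_equal_DStrIMask : Prop := ∀ (i : Int) (m : Int), Dom_DStrIMask i m → Spec_DStrIMask i m (DStrIMask i m)

-- ===== LEMMAS AND PROOFS =====

theorem pvShift2 (a : Int) : (a >>> (1 : Nat)) >>> (1 : Nat) = a >>> (2 : Nat) := by
  simp [Int.shiftRight_eq_div_pow]
  omega

theorem pvMod2 (a : Int) : a % 2 = 0 ∨ a % 2 = 1 := Int.emod_two_eq a

-- ===== VERDICT =====
set_option maxHeartbeats 2000000 in
theorem DStrIMask_spec : Claim_equal_DStrIMask := by
  intro i m _
  unfold Spec_DStrIMask DStrIMask DStrIMask_alt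
  have hr : PySem.List.pyRange 0 3 1 = [0, 1, 2] := by decide
  have hi0 : i >>> (0 : Nat) = i := by simp [Int.shiftRight_eq_div_pow]
  have hm0 : m >>> (0 : Nat) = m := by simp [Int.shiftRight_eq_div_pow]
  rcases pvMod2 i with h0 | h0 <;> rcases pvMod2 (i >>> (1 : Nat)) with h1 | h1 <;>
    rcases pvMod2 (i >>> (2 : Nat)) with h2 | h2 <;>
    rcases pvMod2 m with g0 | g0 <;> rcases pvMod2 (m >>> (1 : Nat)) with g1 | g1 <;>
    rcases pvMod2 (m >>> (2 : Nat)) with g2 | g2 <;>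
    simp [pvGo, hr, hi0, hm0, pvShift2, PySem.Int.band_one, -EuclideanDomain.mod_eq_zero,
          h0, h1, h2, g0, g1, g2,
          PySem.Str.join, PySem.Chars.join, PySem.List.pyGetD, PySem.List.pyIdx?,
          PySem.List.pyGet?] <;> decide
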